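-- pv_equiv track=rewrite | github.com/kmkurn/msc-project | src/dataset.py | _concat_parsed_sentences
-- ===== SOURCE A (Python) =====
-- def _concat_parsed_sentences(sentences):
--     buff = []
--     bracket_cnt = 0
--     for sent in sentences:
--         s = sent.strip()
--         buff.append(s)
--         for c in s:
--             if c == '(':
--                 bracket_cnt += 1
--             elif c == ')':
--                 bracket_cnt -= 1
--         if bracket_cnt == 0:
--             yield ' '.join(buff)
--             buff = []
--             bracket_cnt = 0
-- ===== SOURCE B (Python) =====
-- def _concat_parsed_sentences(sentences):
--     # Pass 1: strip everything and build a boundary table: the index just past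
--     # each sentence where the running paren balance returns to zero.
--     stripped = [s.strip() for s in sentences]
--     bounds = []
--     total = 0
--     for i, s in enumerate(stripped):
--         total += s.count('(') - s.count(')')
--         if total == 0:
--             bounds.append(i + 1)
--     # Pass 2: slice the stripped list at consecutive boundaries and join.
--     start = 0
--     for b in bounds:
--         yield ' '.join(stripped[start:b])
--         start = b
-- ===== Notes on version B (the rewrite author's own statement) =====
-- stated objective: alternative
-- what changed: Replaces A's single interleaved loop (buffer + running counter + yield inside the loop) with two separately-shaped passes: pass 1 builds a boundary-index table of the positions where the running paren balance returns to zero (using str.count instead of a per-character loop), pass 2 slices the stripped list at consecutive boundaries and joins each slice; a trailing unbalanced remainder has no boundary and is dropped just like in A.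
import Mathlib
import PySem

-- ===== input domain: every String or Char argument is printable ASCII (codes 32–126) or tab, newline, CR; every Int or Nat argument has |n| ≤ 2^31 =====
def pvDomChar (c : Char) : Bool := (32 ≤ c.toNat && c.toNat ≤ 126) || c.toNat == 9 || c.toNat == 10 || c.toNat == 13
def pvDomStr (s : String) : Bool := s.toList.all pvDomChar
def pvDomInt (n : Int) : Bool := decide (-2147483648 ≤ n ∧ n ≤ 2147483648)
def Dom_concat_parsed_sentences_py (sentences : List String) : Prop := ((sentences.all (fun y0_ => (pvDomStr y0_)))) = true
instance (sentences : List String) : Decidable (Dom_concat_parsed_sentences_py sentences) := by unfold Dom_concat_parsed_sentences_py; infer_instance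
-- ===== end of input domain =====

-- B replaces A's interleaved loop with two passes: a boundary table of segment lengths
-- at zero crossings of the paren balance, then slice-and-join; proved equal (objective: alternative).


-- ===== PORT A =====
-- inner 'for c in s' loop of A
def cpsCharStep (cnt : Int) (c : Char) : Int :=
  if c = '(' then cnt + 1 else if c = ')' then cnt - 1 else cnt

-- body of A's 'for sent in sentences' loop; state = (buff, bracket_cnt, yielded)
def cpsStepA (st : List String × Int × List String) (sent : String) : List String × Int × List String :=
  let s := PySem.Str.strip sent
  let buff := st.1 ++ [s]
  let cnt := s.toList.foldl cpsCharStep st.2.1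
  if cnt = 0 then ([], 0, st.2.2 ++ [PySem.Str.join " " buff])
  else (buff, cnt, st.2.2)

def concat_parsed_sentences_py (sentences : List String) : List String :=
  (sentences.foldl cpsStepA ([], 0, [])).2.2

-- ===== PORT B =====
-- s.count('(') - s.count(')')
def cpsDelta (s : String) : Int :=
  (PySem.Str.count s "(" : Int) - (PySem.Str.count s ")" : Int)

-- pass-1 loop body over enumerate(stripped); state = (total, bounds)
def cpsBStep (st : Int × List Int) (p : Int × String) : Int × List Int :=
  let total := st.1 + cpsDelta p.2
  if total = 0 then (total, st.2 ++ [p.1 + 1]) else (total, st.2)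

-- pass-2 loop body; state = (start, yielded): yield ' '.join(stripped[start:b]); start = b
def cpsEmitStep (stripped : List String) (st : Int × List String) (b : Int) : Int × List String :=
  (b, st.2 ++ [PySem.Str.join " " (PySem.List.slice stripped (some st.1) (some b))])

def concat_parsed_sentences_py_alt (sentences : List String) : List String :=
  let stripped := sentences.map PySem.Str.strip
  let bounds := ((PySem.List.enumerate stripped 0).foldl cpsBStep (0, [])).2
  (bounds.foldl (cpsEmitStep stripped) (0, [])).2

-- ===== PRECONDITION & SPEC =====
def Spec_concat_parsed_sentences_py (sentences : List String) (out : List String) : Prop := out = concat_parsed_sentences_py_alt sentences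
instance (sentences : List String) (out : List String) : Decidable (Spec_concat_parsed_sentences_py sentences out) := by unfold Spec_concat_parsed_sentences_py; infer_instance

-- ===== CLAIM (what is proved, stated in full; the proofs are below) =====
def Claim_equal_concat_parsed_sentences_py : Prop := ∀ (sentences : List String), Dom_concat_parsed_sentences_py sentences → Spec_concat_parsed_sentences_py sentences (concat_parsed_sentences_py sentences)

-- ===== LEMMAS AND PROOFS =====

-- common recursive description of the grouping (over already-stripped sentences)
def cpsRec : List String → List String → Int → List String
  | [], _, _ => []
  | s :: rest, buff, cnt =>
    let cnt' := cnt + cpsDelta s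
    if cnt' = 0 then PySem.Str.join " " (buff ++ [s]) :: cpsRec rest [] 0
    else cpsRec rest (buff ++ [s]) cnt'

-- str.count with a single-character needle counts characters
theorem cps_count_go_single (c : Char) : ∀ (fuel : Nat) (l : List Char) (acc : Nat),
    l.length ≤ fuel → PySem.Chars.count.go [c] fuel l acc = acc + l.count c := by
  intro fuel
  induction fuel with
  | zero =>
    intro l acc h
    have : l = [] := List.eq_nil_of_length_eq_zero (Nat.le_zero.mp h)
    subst this
    simp [PySem.Chars.count.go]
  | succ n ih =>
    intro l acc h
    cases l with
    | nil => simp [PySem.Chars.count.go]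
    | cons hd t =>
      have ht : t.length ≤ n := by simpa using h
      by_cases hc : c = hd
      · subst hc
        simp [PySem.Chars.count.go, List.isPrefixOf, ih t (acc + 1) ht]
        omega
      · simp [PySem.Chars.count.go, List.isPrefixOf, hc, ih t acc ht, Ne.symm hc]

theorem cps_count_single (s : String) (sub : String) (c : Char) (hsub : sub.toList = [c]) :
    PySem.Str.count s sub = s.toList.count c := by
  rw [PySem.Str.count_eq, hsub]
  have h := cps_count_go_single c s.toList.length s.toList 0 le_rfl
  simp [PySem.Chars.count]
  simpa using h

-- A's per-character loop computes cnt + delta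
theorem cps_charfold (l : List Char) (cnt : Int) :
    l.foldl cpsCharStep cnt = cnt + ((l.count '(' : Int) - (l.count ')' : Int)) := by
  induction l generalizing cnt with
  | nil => simp
  | cons hd t ih =>
    by_cases h1 : hd = '('
    · subst h1
      simp [cpsCharStep, ih]
      ring
    · by_cases h2 : hd = ')'
      · subst h2
        simp [cpsCharStep, ih]
        ring
      · simp [cpsCharStep, h1, h2, ih]

theorem cps_delta_eq (s : String) :
    cpsDelta s = (s.toList.count '(' : Int) - (s.toList.count ')' : Int) := by
  unfold cpsDelta
  have h1 : PySem.Str.count s "(" = s.toList.count '(' := cps_count_single s "(" '(' rfl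
  have h2 : PySem.Str.count s ")" = s.toList.count ')' := cps_count_single s ")" ')' rfl
  rw [h1, h2]

-- A's fold equals the recursive description
theorem cps_A_rec (l : List String) (buff : List String) (cnt : Int) (out : List String) :
    (l.foldl cpsStepA (buff, cnt, out)).2.2 = out ++ cpsRec (l.map PySem.Str.strip) buff cnt := by
  induction l generalizing buff cnt out with
  | nil => simp [cpsRec]
  | cons s t ih =>
    have hc : (PySem.Str.strip s).toList.foldl cpsCharStep cnt
        = cnt + cpsDelta (PySem.Str.strip s) := by
      rw [cps_charfold, cps_delta_eq]
    simp only [List.foldl_cons, List.map_cons, cpsStepA, cpsRec, hc]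
    by_cases h : cnt + cpsDelta (PySem.Str.strip s) = 0
    · simp [h, ih]
    · simp [h, ih]

-- B's pass-1 fold over enumerate equals a recursive boundary table
def cpsBounds : List String → Int → Int → List Int
  | [], _, _ => []
  | s :: t, k, total =>
    let total' := total + cpsDelta s
    if total' = 0 then (k + 1) :: cpsBounds t (k + 1) total'
    else cpsBounds t (k + 1) total'

theorem cps_bounds_fold (l : List String) (k total : Int) (acc : List Int) :
    ((PySem.List.enumerate l k).foldl cpsBStep (total, acc)).2 = acc ++ cpsBounds l k total := by
  induction l generalizing k total acc with
  | nil => simp [PySem.List.enumerate_nil, cpsBounds]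
  | cons s t ih =>
    rw [PySem.List.enumerate_cons]
    simp only [List.foldl_cons, cpsBStep, cpsBounds]
    by_cases h : total + cpsDelta s = 0
    · simp [h, ih]
    · simp [h, ih]

-- B's pass-2 fold equals a recursive slicer
def cpsEmitRec (stripped : List String) : List Int → Int → List String
  | [], _ => []
  | b :: bs, start =>
    PySem.Str.join " " (PySem.List.slice stripped (some start) (some b))
      :: cpsEmitRec stripped bs b

theorem cps_emit_fold (stripped : List String) (bs : List Int) (start : Int) (out : List String) :
    (bs.foldl (cpsEmitStep stripped) (start, out)).2 = out ++ cpsEmitRec stripped bs start := by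
  induction bs generalizing start out with
  | nil => simp [cpsEmitRec]
  | cons b t ih => simp [cpsEmitStep, cpsEmitRec, ih]

-- key invariant: slicing stripped at the zero-crossing indices reproduces the groups
theorem cps_key (l : List String) (stripped : List String) (k start : Nat) (total : Int)
    (hd : stripped.drop k = l) (hs : start ≤ k) :
    cpsEmitRec stripped (cpsBounds l (k : Int) total) (start : Int)
      = cpsRec l ((stripped.drop start).take (k - start)) total := by
  induction l generalizing k start total with
  | nil => simp [cpsBounds, cpsEmitRec, cpsRec]
  | cons s t ih =>
    have hk : stripped[k]? = some s := by
      have h0 : (stripped.drop k)[0]? = stripped[k + 0]? := List.getElem?_drop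
      rw [hd] at h0
      simpa using h0.symm
    have hd' : stripped.drop (k + 1) = t := by
      have h1 : stripped.drop (k + 1) = (stripped.drop k).drop 1 := by
        rw [List.drop_drop, Nat.add_comm]
      rw [h1, hd, List.drop_one, List.tail_cons]
    have hget : (stripped.drop start)[k - start]? = some s := by
      rw [List.getElem?_drop]
      have h2 : start + (k - start) = k := by omega
      rw [h2, hk]
    have htake : (stripped.drop start).take (k - start + 1)
        = (stripped.drop start).take (k - start) ++ [s] := by
      rw [List.take_add_one, hget]
      rfl
    simp only [cpsBounds, cpsRec]
    by_cases h : total + cpsDelta s = 0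
    · rw [if_pos h, if_pos h]
      simp only [cpsEmitRec]
      have hsl : PySem.List.slice stripped (some (start : Int)) (some ((k : Int) + 1))
          = (stripped.drop start).take (k - start) ++ [s] := by
        have hcast : ((k : Int) + 1) = ((k + 1 : Nat) : Int) := by push_cast; ring
        rw [hcast, PySem.List.slice_natCast]
        have h3 : k + 1 - start = k - start + 1 := by omega
        rw [h3, htake]
      rw [hsl]
      have htail := ih (k + 1) (k + 1) (total + cpsDelta s) hd' (le_refl _)
      simp only [Nat.sub_self, List.take_zero] at htail
      have hcast : ((k + 1 : Nat) : Int) = (k : Int) + 1 := by push_cast; ring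
      rw [hcast] at htail
      rw [h] at htail ⊢
      rw [htail]
    · rw [if_neg h, if_neg h]
      have htail := ih (k + 1) start (total + cpsDelta s) hd' (by omega)
      have hcast : ((k + 1 : Nat) : Int) = (k : Int) + 1 := by push_cast; ring
      rw [hcast] at htail
      rw [htail]
      have h3 : k + 1 - start = k - start + 1 := by omega
      rw [h3, htake]

-- ===== VERDICT (by name: the statement is the Claim_ definition above) =====
theorem concat_parsed_sentences_py_spec : Claim_equal_concat_parsed_sentences_py := by
  intro sentences _
  unfold Spec_concat_parsed_sentences_py concat_parsed_sentences_py concat_parsed_sentences_py_alt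
  simp only [cps_A_rec, cps_bounds_fold, cps_emit_fold, List.nil_append]
  have h := cps_key (sentences.map PySem.Str.strip) (sentences.map PySem.Str.strip) 0 0 0
    (by simp) (le_refl 0)
  simp only [Nat.cast_zero, List.drop_zero, Nat.sub_zero, List.take_zero] at h
  exact h.symm
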